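-- pv_equiv track=rewrite | github.com/Akash-Kadali/HIREX | backend/api/optimize.py | _find_macro_items
-- ===== SOURCE A (Python) =====
-- from typing import List, Tuple, Dict, Iterable, Optional, Set
--
-- def _find_macro_items(block: str, macro: str) -> List[Tuple[int, int, int, int]]:
--     """
--     Find occurrences of a macro like \macro{...} with balanced braces.
--     Returns a list of (start_idx, open_brace_idx, close_brace_idx, end_idx).
--     """
--     out: List[Tuple[int, int, int, int]] = []
--     i = 0
--     needle = f"\\{macro}{{"  # e.g., "\resumeSubItem{"
--     while True:
--         i = block.find(needle, i)
--         if i < 0: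
--             break
--
--         # index of the opening '{'
--         open_b = i + len(f"\\{macro}")
--         if open_b >= len(block) or block[open_b] != "{":
--             i += 1
--             continue
--
--         depth, j = 0, open_b
--         while j < len(block):
--             ch = block[j]
--             if ch == "{":
--                 depth += 1
--             elif ch == "}":
--                 depth -= 1
--                 if depth == 0:
--                     close_b = j
--                     out.append((i, open_b, close_b, close_b + 1))
--                     i = close_b + 1
--                     break
--             j += 1
--         else:
--             # unmatched braces; stop scanning
--             break
--
--     return out
-- ===== SOURCE B (Python) =====
-- def _find_macro_items(block, macro):
--     """Two-pass version: pre-match every '{' to its '}' with an index stack,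
--     then walk needle occurrences with find() and a cursor, looking matches up."""
--     match = {}
--     stack = []
--     for idx, ch in enumerate(block):
--         if ch == '{':
--             stack.append(idx)
--         elif ch == '}':
--             if stack:
--                 match[stack.pop()] = idx
--     needle = "\\" + macro + "{"
--     out = []
--     pos = 0
--     while True:
--         i = block.find(needle, pos)
--         if i < 0:
--             return out
--         open_b = i + 1 + len(macro)
--         close_b = match.get(open_b)
--         if close_b is None:
--             return out
--         out.append((i, open_b, close_b, close_b + 1))
--         pos = close_b + 1
-- ===== Notes on version B (the rewrite author's own statement) =====
-- stated objective: alternative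
-- what changed: A re-scans characters with a depth counter at every needle occurrence; B makes one linear stack pass that pre-matches every '{' to its '}' in a dict and then resolves each find() occurrence by a single dict lookup.
import Mathlib
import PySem

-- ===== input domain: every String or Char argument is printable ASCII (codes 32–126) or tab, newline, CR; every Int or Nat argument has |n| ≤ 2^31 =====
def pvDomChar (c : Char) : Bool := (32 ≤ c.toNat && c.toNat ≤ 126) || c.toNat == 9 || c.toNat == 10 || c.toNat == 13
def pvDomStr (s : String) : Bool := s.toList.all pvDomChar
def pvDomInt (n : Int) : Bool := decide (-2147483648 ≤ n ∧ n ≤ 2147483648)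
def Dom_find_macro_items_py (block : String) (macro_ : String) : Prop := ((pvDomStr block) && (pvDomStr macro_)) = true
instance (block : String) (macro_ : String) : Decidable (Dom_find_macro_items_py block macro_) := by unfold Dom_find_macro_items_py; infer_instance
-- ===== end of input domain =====

-- B replaces A's per-occurrence balanced-brace character scan by one linear stack pass that
-- pre-matches every '{' to its '}' in a dict, then a lookup pass over the needle occurrences (alternative decomposition).

-- ===== PORT A =====
-- A's inner while-j loop: depth counter scan from index j (depth, j as in the Python).
def pvAScan (cs : List Char) (j : Nat) (depth : Int) : Option Nat :=
  if h : j < cs.length then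
    let ch := cs[j]
    if ch = '{' then pvAScan cs (j+1) (depth+1)
    else if ch = '}' then
      (if depth - 1 = 0 then some j else pvAScan cs (j+1) (depth-1))
    else pvAScan cs (j+1) depth
  else none
termination_by cs.length - j

-- A's outer while-True loop; fuel only makes the recursion total (the Python cursor strictly
-- increases and is bounded by len(block), so fuel len+2 is never exhausted).
def pvALoop (cs needle : List Char) (mlen1 : Nat) : Nat → Nat → List (Int × Int × Int × Int)
  | 0, _ => []
  | fuel+1, i0 =>
    let i := PySem.Chars.findFrom cs needle (i0 : Int) none
    if i < 0 then []
    else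
      let open_b : Int := i + mlen1
      if open_b ≥ (cs.length : Int) ∨ PySem.List.pyGet? cs open_b ≠ some '{' then
        pvALoop cs needle mlen1 fuel (i.toNat + 1)
      else
        match pvAScan cs open_b.toNat 0 with
        | some close_b =>
            (i, open_b, (close_b : Int), (close_b : Int) + 1) ::
              pvALoop cs needle mlen1 fuel (close_b + 1)
        | none => []

def find_macro_items_py (block : String) (macro_ : String) : List (Int × Int × Int × Int) :=
  let cs := block.toList
  let needle := '\\' :: macro_.toList ++ ['{']
  pvALoop cs needle (1 + macro_.toList.length) (cs.length + 2) 0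

-- ===== PORT B =====
-- one step of B's first pass: stack of '{' indices, dict of matches
def pvBStep (st : List Int × PySem.Dict Int Int) (p : Int × Char) : List Int × PySem.Dict Int Int :=
  if p.2 = '{' then (p.1 :: st.1, st.2)
  else if p.2 = '}' then
    match st.1 with
    | [] => st
    | top :: rest => (rest, st.2.insert top p.1)
  else st

def pvBMatch (cs : List Char) : PySem.Dict Int Int :=
  ((PySem.List.enumerate cs 0).foldl pvBStep ([], PySem.Dict.empty)).2

-- B's lookup loop (fuel as for A's loop: totality only)
def pvBLoop (cs needle : List Char) (mlen : Nat) (d : PySem.Dict Int Int) :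
    Nat → Nat → List (Int × Int × Int × Int)
  | 0, _ => []
  | fuel+1, pos =>
    let i := PySem.Chars.findFrom cs needle (pos : Int) none
    if i < 0 then []
    else
      match d.get? (i + 1 + mlen) with
      | none => []
      | some close_b =>
          (i, i + 1 + (mlen : Int), close_b, close_b + 1) ::
            pvBLoop cs needle mlen d fuel (close_b + 1).toNat

def find_macro_items_py_alt (block : String) (macro_ : String) : List (Int × Int × Int × Int) :=
  let cs := block.toList
  let d := pvBMatch cs
  pvBLoop cs ('\\' :: macro_.toList ++ ['{']) macro_.toList.length d (cs.length + 2) 0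

-- ===== PRECONDITION & SPEC =====
def Spec_find_macro_items_py (block : String) (macro_ : String) (out : List (Int × Int × Int × Int)) : Prop := out = find_macro_items_py_alt block macro_
instance (block : String) (macro_ : String) (out : List (Int × Int × Int × Int)) : Decidable (Spec_find_macro_items_py block macro_ out) := by unfold Spec_find_macro_items_py; infer_instance

-- ===== CLAIM (what is proved, stated in full; the proofs are below) =====
def Claim_equal_find_macro_items_py : Prop := ∀ (block : String) (macro_ : String), Dom_find_macro_items_py block macro_ → Spec_find_macro_items_py block macro_ (find_macro_items_py block macro_)

-- ===== LEMMAS AND PROOFS =====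

-- offset form of A's depth scan, for reasoning about suffixes
def pvScanOff : List Char → Int → Option Nat
  | [], _ => none
  | c :: rest, depth =>
    if c = '{' then (pvScanOff rest (depth+1)).map (· + 1)
    else if c = '}' then
      (if depth - 1 = 0 then some 0 else (pvScanOff rest (depth-1)).map (· + 1))
    else (pvScanOff rest depth).map (· + 1)

lemma pvAScan_eq_scanOff (cs : List Char) (j : Nat) (depth : Int) :
    pvAScan cs j depth = (pvScanOff (cs.drop j) depth).map (j + ·) := by
  by_cases h : j < cs.length
  · have hd : cs.drop j = cs[j] :: cs.drop (j+1) := (List.drop_eq_getElem_cons h)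
    rw [pvAScan, dif_pos h, hd]
    simp only [pvScanOff]
    split_ifs with h1 h2 h3
    · rw [pvAScan_eq_scanOff cs (j+1) (depth+1)]
      cases pvScanOff (cs.drop (j+1)) (depth+1) <;> simp <;> omega
    · simp
    · rw [pvAScan_eq_scanOff cs (j+1) (depth-1)]
      cases pvScanOff (cs.drop (j+1)) (depth-1) <;> simp <;> omega
    · rw [pvAScan_eq_scanOff cs (j+1) depth]
      cases pvScanOff (cs.drop (j+1)) depth <;> simp <;> omega
  · rw [pvAScan, dif_neg h, List.drop_eq_nil_of_le (by omega)]
    simp [pvScanOff]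
termination_by cs.length - j


lemma pvScanOff_lt {l : List Char} {d : Int} {o : Nat} (h : pvScanOff l d = some o) :
    o < l.length := by
  induction l generalizing d o with
  | nil => simp [pvScanOff] at h
  | cons c rest ih =>
    simp only [pvScanOff] at h
    split_ifs at h
    · obtain ⟨o', ho', rfl⟩ := Option.map_eq_some_iff.mp h
      have := ih ho'; simp; omega
    · simp at h ⊢; omega
    · obtain ⟨o', ho', rfl⟩ := Option.map_eq_some_iff.mp h
      have := ih ho'; simp; omega
    · obtain ⟨o', ho', rfl⟩ := Option.map_eq_some_iff.mp h
      have := ih ho'; simp; omega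


-- the main invariant of B's first pass
lemma pvPass_spec (l : List Char) : ∀ (k : Nat) (s : List Int) (d : PySem.Dict Int Int),
    (∀ x ∈ s, 0 ≤ x ∧ x < (k : Int)) →
    s.Pairwise (· > ·) →
    (∀ q v, d.get? q = some v → q < (k : Int) ∧ q ∉ s) →
    (∀ q v, d.get? q = some v →
       ((PySem.List.enumerate l (k : Int)).foldl pvBStep (s, d)).2.get? q = some v) ∧
    (∀ t (ht : t < s.length),
       ((PySem.List.enumerate l (k : Int)).foldl pvBStep (s, d)).2.get? s[t]
         = (pvScanOff l ((t : Int) + 1)).map (fun o => (k : Int) + o)) ∧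
    (∀ off (hoff : off < l.length), l[off] = '{' →
       ((PySem.List.enumerate l (k : Int)).foldl pvBStep (s, d)).2.get? ((k : Int) + off)
         = (pvScanOff (l.drop off) 0).map (fun o => (k : Int) + off + o)) := by
  induction l with
  | nil =>
    intro k s d hS hP hD
    refine ⟨fun q v h => h, fun t ht => ?_, fun off hoff => by simp at hoff⟩
    simp only [PySem.List.enumerate_nil, List.foldl_nil, pvScanOff]
    cases h : d.get? s[t] with
    | none => rfl
    | some v => exact absurd (List.getElem_mem ht) (hD _ v h).2
  | cons c l' ih =>
    intro k s d hS hP hD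
    have hk1 : (k : Int) + 1 = ((k+1 : Nat) : Int) := by push_cast; ring
    simp only [PySem.List.enumerate_cons, List.foldl_cons, hk1]
    by_cases hc1 : c = '{'
    · -- push k
      have hstep : pvBStep (s, d) ((k : Int), c) = ((k : Int) :: s, d) := by
        simp [pvBStep, hc1]
      rw [hstep]
      have hS' : ∀ x ∈ ((k:Int) :: s), 0 ≤ x ∧ x < ((k+1 : Nat) : Int) := by
        intro x hx
        rcases List.mem_cons.mp hx with rfl | hx
        · constructor <;> push_cast <;> omega
        · have := hS x hx; constructor <;> push_cast <;> omega
      have hP' : ((k:Int) :: s).Pairwise (· > ·) := by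
        refine List.Pairwise.cons (fun x hx => ?_) hP
        have := hS x hx; omega
      have hD' : ∀ q v, d.get? q = some v → q < ((k+1 : Nat) : Int) ∧ q ∉ ((k:Int) :: s) := by
        intro q v h; have := hD q v h
        refine ⟨by push_cast; omega, ?_⟩
        intro hq
        rcases List.mem_cons.mp hq with rfl | hq
        · omega
        · exact this.2 hq
      obtain ⟨I1, I2, I3⟩ := ih (k+1) ((k:Int) :: s) d hS' hP' hD'
      refine ⟨I1, ?_, ?_⟩
      · intro t ht
        have := I2 (t+1) (by simp; omega)
        simp only [List.getElem_cons_succ] at this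
        rw [show (((t+1:Nat)):Int) + 1 = (t:Int) + 1 + 1 by push_cast; ring] at this
        rw [this]
        simp only [pvScanOff, if_pos hc1]
        cases pvScanOff l' ((t:Int) + 1 + 1) <;> simp <;> omega
      · intro off hoff hbr
        match off with
        | 0 =>
          have h2 := I2 0 (by simp)
          simp only [List.getElem_cons_zero, Nat.cast_zero] at h2
          simp only [Nat.cast_zero, add_zero, List.drop_zero, pvScanOff, if_pos hc1]
          rw [h2]
          cases pvScanOff l' (0 + 1) <;> simp <;> omega
        | e+1 =>
          have he : e < l'.length := by simpa using Nat.lt_of_succ_lt_succ hoff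
          have hbr' : l'[e] = '{' := by simpa using hbr
          have := I3 e he hbr'
          rw [show (k:Int) + ((e+1 : Nat) : Int) = ((k+1:Nat):Int) + (e:Nat) by push_cast; ring, this]
          simp only [List.drop_succ_cons]
    · by_cases hc2 : c = '}'
      · match hs : s with
        | [] =>
          have hstep : pvBStep ([], d) ((k : Int), c) = ([], d) := by
            simp [pvBStep, hc2]
          rw [hstep]
          have hD' : ∀ q v, d.get? q = some v → q < ((k+1 : Nat) : Int) ∧ q ∉ ([] : List Int) := by
            intro q v h; have := hD q v h
            exact ⟨by push_cast; omega, by simp⟩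
          obtain ⟨I1, I2, I3⟩ := ih (k+1) [] d (by simp) (by simp) hD'
          refine ⟨I1, by simp, ?_⟩
          intro off hoff hbr
          match off with
          | 0 => simp [hc2] at hbr
          | e+1 =>
            have he : e < l'.length := by simpa using Nat.lt_of_succ_lt_succ hoff
            have hbr' : l'[e] = '{' := by simpa using hbr
            have := I3 e he hbr'
            rw [show (k:Int) + ((e+1 : Nat) : Int) = ((k+1:Nat):Int) + (e:Nat) by push_cast; ring, this]
            simp only [List.drop_succ_cons]
        | top :: rest =>
          have hstep : pvBStep (top :: rest, d) ((k : Int), c) = (rest, d.insert top (k:Int)) := by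
            simp [pvBStep, hc2]
          rw [hstep]
          have htop_lt : top < (k:Int) := (hS top (by simp)).2
          have htop_rest : top ∉ rest := by
            intro h
            have := (List.pairwise_cons.mp hP).1 top h; omega
          have hS' : ∀ x ∈ rest, 0 ≤ x ∧ x < ((k+1 : Nat) : Int) := by
            intro x hx; have := hS x (by simp [hx]); constructor <;> push_cast <;> omega
          have hP' : rest.Pairwise (· > ·) := (List.pairwise_cons.mp hP).2
          have hD' : ∀ q v, (d.insert top (k:Int)).get? q = some v →
              q < ((k+1 : Nat) : Int) ∧ q ∉ rest := by
            intro q v h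
            rw [PySem.Dict.get?_insert] at h
            split_ifs at h with hq
            · subst hq; exact ⟨by push_cast; omega, htop_rest⟩
            · have := hD q v h
              exact ⟨by push_cast; omega, fun hmem => this.2 (by simp [hmem])⟩
          obtain ⟨I1, I2, I3⟩ := ih (k+1) rest (d.insert top (k:Int)) hS' hP' hD'
          refine ⟨?_, ?_, ?_⟩
          · intro q v h
            have hq : q ≠ top := by
              intro hq; exact (hD q v h).2 (by simp [hq])
            exact I1 q v (by rw [PySem.Dict.get?_insert, if_neg hq]; exact h)
          · intro t ht
            match t with
            | 0 =>
              have := I1 top (k:Int) (by rw [PySem.Dict.get?_insert, if_pos rfl])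
              simp only [List.getElem_cons_zero]
              rw [this]
              simp [pvScanOff, hc2]
            | e+1 =>
              have := I2 e (by simpa using Nat.lt_of_succ_lt_succ ht)
              simp only [List.getElem_cons_succ]
              rw [this]
              simp only [pvScanOff, if_neg hc1, if_pos hc2]
              rw [if_neg (by push_cast; omega)]
              rw [show ((e+1 : Nat) : Int) + 1 - 1 = (e:Nat) + 1 by push_cast; ring]
              cases pvScanOff l' ((e:Nat) + 1) <;> simp <;> omega
          · intro off hoff hbr
            match off with
            | 0 => simp [hc2] at hbr
            | e+1 =>
              have he : e < l'.length := by simpa using Nat.lt_of_succ_lt_succ hoff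
              have hbr' : l'[e] = '{' := by simpa using hbr
              have := I3 e he hbr'
              rw [show (k:Int) + ((e+1 : Nat) : Int) = ((k+1:Nat):Int) + (e:Nat) by push_cast; ring, this]
              simp only [List.drop_succ_cons]
      · have hstep : pvBStep (s, d) ((k : Int), c) = (s, d) := by
          simp [pvBStep, hc1, hc2]
        rw [hstep]
        have hS' : ∀ x ∈ s, 0 ≤ x ∧ x < ((k+1 : Nat) : Int) := by
          intro x hx; have := hS x hx; constructor <;> push_cast <;> omega
        have hD' : ∀ q v, d.get? q = some v → q < ((k+1 : Nat) : Int) ∧ q ∉ s := by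
          intro q v h; have := hD q v h; exact ⟨by push_cast; omega, this.2⟩
        obtain ⟨I1, I2, I3⟩ := ih (k+1) s d hS' hP hD'
        refine ⟨I1, ?_, ?_⟩
        · intro t ht
          have := I2 t ht
          rw [this]
          simp only [pvScanOff, if_neg hc1, if_neg hc2]
          cases pvScanOff l' ((t:Int) + 1) <;> simp <;> omega
        · intro off hoff hbr
          match off with
          | 0 => simp [hc1] at hbr
          | e+1 =>
            have he : e < l'.length := by simpa using Nat.lt_of_succ_lt_succ hoff
            have hbr' : l'[e] = '{' := by simpa using hbr
            have := I3 e he hbr'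
            rw [show (k:Int) + ((e+1 : Nat) : Int) = ((k+1:Nat):Int) + (e:Nat) by push_cast; ring, this]
            simp only [List.drop_succ_cons]


lemma pvBMatch_get (cs : List Char) (off : Nat) (hoff : off < cs.length) (h : cs[off] = '{') :
    (pvBMatch cs).get? (off : Int)
      = (pvScanOff (cs.drop off) 0).map (fun o => ((off + o : Nat) : Int)) := by
  obtain ⟨-, -, I3⟩ := pvPass_spec cs 0 [] PySem.Dict.empty (by simp) (by simp)
    (by intro q v hv; simp [PySem.Dict.get?_empty] at hv)
  have := I3 off hoff h
  simp only [Nat.cast_zero, zero_add] at this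
  unfold pvBMatch
  rw [this]
  cases pvScanOff (cs.drop off) 0 <;> simp

lemma pvLoop_eq (cs m : List Char) :
    ∀ (fuel : Nat) (pos : Nat), pos ≤ cs.length →
      pvALoop cs ('\\' :: m ++ ['{']) (1 + m.length) fuel pos
        = pvBLoop cs ('\\' :: m ++ ['{']) m.length (pvBMatch cs) fuel pos := by
  intro fuel
  induction fuel with
  | zero => intro pos _; rfl
  | succ fuel ih =>
    intro pos hpos
    rw [pvALoop, pvBLoop]
    by_cases hi : PySem.Chars.findFrom cs ('\\' :: m ++ ['{']) (pos : Int) none < 0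
    · simp only [if_pos hi]
    · simp only [if_neg hi]
      set i := PySem.Chars.findFrom cs ('\\' :: m ++ ['{']) (pos : Int) none with hidef
      have hne : i ≠ -1 := by omega
      obtain ⟨hle, hpre, -⟩ := PySem.Chars.findFrom_natCast_spec cs ('\\' :: m ++ ['{']) pos hpos hne
      have h0 : 0 ≤ i := by omega
      have hcast : ((i.toNat : Nat) : Int) = i := Int.toNat_of_nonneg h0
      set n := i.toNat with hndef
      have hlen : n + (m.length + 2) ≤ cs.length := by
        have h1 := hpre.length_le
        simp at h1
        omega
      have hoblt : n + 1 + m.length < cs.length := by omega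
      have hbr : cs[n + 1 + m.length]'hoblt = '{' := by
        have h1 : ('\\' :: m ++ ['{'])[m.length + 1]'(by simp) = '{' := by
          simp
        have h2 := hpre.getElem (i := m.length + 1) (by simp)
        simp only [List.getElem_drop] at h2
        simp only [show n + 1 + m.length = n + (m.length + 1) from by omega]
        rw [← h2, h1]
      have hob : i + (1 + m.length : Nat) = ((n + 1 + m.length : Nat) : Int) := by push_cast; omega
      have hobB : i + 1 + (m.length : Int) = ((n + 1 + m.length : Nat) : Int) := by push_cast; omega
      have hguard : ¬ ((i + ((1 + m.length : Nat) : Int) ≥ (cs.length : Int)) ∨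
          PySem.List.pyGet? cs (i + ((1 + m.length : Nat) : Int)) ≠ some '{') := by
        rw [not_or]
        refine ⟨not_le.mpr ?_, not_not_intro ?_⟩
        · rw [show i + ((1 + m.length : Nat) : Int) = ((n + 1 + m.length : Nat) : Int) by push_cast; omega]
          push_cast; omega
        · rw [show i + ((1 + m.length : Nat) : Int) = ((n + 1 + m.length : Nat) : Int) by push_cast; omega,
            PySem.List.pyGet?_natCast, List.getElem?_eq_getElem hoblt, hbr]
      rw [if_neg hguard]
      have htn : (i + ((1 + m.length : Nat) : Int)).toNat = n + 1 + m.length := by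
        rw [hob]; exact Int.toNat_natCast _
      rw [htn, pvAScan_eq_scanOff]
      rw [hobB, pvBMatch_get cs (n + 1 + m.length) hoblt hbr]
      cases hscan : pvScanOff (cs.drop (n + 1 + m.length)) 0 with
      | none => simp
      | some o =>
        have holt : o < cs.length - (n + 1 + m.length) := by
          have := pvScanOff_lt hscan
          simpa using this
        simp only [Option.map_some]
        have hrec := ih (n + 1 + m.length + o + 1) (by omega)
        rw [show (((n + 1 + m.length + o : Nat) : Int) + 1).toNat = n + 1 + m.length + o + 1 by omega]
        rw [show n + 1 + m.length + o + 1 = n + 1 + m.length + o + 1 from rfl] at hrec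
        rw [hrec]
        congr 1
        simp only [Prod.mk.injEq]
        trivial

-- ===== VERDICT (by name: the statement is the Claim_ definition above) =====
theorem find_macro_items_py_spec : Claim_equal_find_macro_items_py := by
  intro block macro_ _
  unfold Spec_find_macro_items_py find_macro_items_py find_macro_items_py_alt
  exact pvLoop_eq block.toList macro_.toList (block.toList.length + 2) 0 (Nat.zero_le _)
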